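-- pv_equiv track=rewrite | github.com/saidvandeklundert/notes | solutions/m_minimum_characters_for_words.py | minimumCharactersForWords
-- ===== SOURCE A (Python) =====
-- def minimumCharactersForWords(words):
--
--     total_char_d = {}
--     for word in words:
--         word_d = {}
--         for c in word:
--             if c in word_d:
--                 word_d[c] += 1
--             else:
--                 word_d[c] = 1
--
--         for k, v in word_d.items():
--             if k in total_char_d:
--                 if v > total_char_d[k]:
--                     total_char_d[k] = v
--             else:
--                 total_char_d[k] = v
--
--     answer = []
--     for k, v in total_char_d.items():
--         extension = [k] * v
--         answer.extend(extension)
--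
--     return answer
-- ===== SOURCE B (Python) =====
-- def minimumCharactersForWords(words):
--     # character-major: one distinct-character pass, then a max over words per character
--     order = dict.fromkeys(c for w in words for c in w)
--     return [c for c in order for _ in range(max(w.count(c) for w in words))]
-- ===== Notes on version B (the rewrite author's own statement) =====
-- stated objective: alternative
-- what changed: B is character-major instead of word-major: it collects the distinct characters of all words in first-appearance order in one pass, then computes each character's requirement as max(w.count(c) for w in words), instead of A's running total dict that merges a per-word frequency dict word by word.
import Mathlib
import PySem

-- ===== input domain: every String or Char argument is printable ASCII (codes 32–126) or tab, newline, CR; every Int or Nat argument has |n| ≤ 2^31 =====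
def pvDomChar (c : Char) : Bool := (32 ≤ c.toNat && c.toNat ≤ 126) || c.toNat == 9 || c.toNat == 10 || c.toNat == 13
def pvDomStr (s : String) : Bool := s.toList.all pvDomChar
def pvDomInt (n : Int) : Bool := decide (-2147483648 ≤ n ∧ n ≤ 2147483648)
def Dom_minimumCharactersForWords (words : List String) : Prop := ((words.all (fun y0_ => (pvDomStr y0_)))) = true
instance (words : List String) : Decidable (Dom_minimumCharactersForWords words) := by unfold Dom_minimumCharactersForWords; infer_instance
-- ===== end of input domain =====

-- B is character-major instead of word-major: one pass collects the distinct characters in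
-- first-appearance order, then each character's requirement is a max of per-word counts;
-- no running total dict, no per-word merge. Alternative decomposition, similar cost.


-- ===== PORT A =====
def minimumCharactersForWords (words : List String) : List String :=
  let total := words.foldl (fun total word =>
    let word_d := word.toList.foldl (fun d c =>
      if d.contains c then d.insert c (d.getD c 0 + 1) else d.insert c 1)
      (PySem.Dict.empty : PySem.Dict Char Int)
    word_d.items.foldl (fun t kv =>
      if t.contains kv.1 then
        if kv.2 > t.getD kv.1 0 then t.insert kv.1 kv.2 else t
      else t.insert kv.1 kv.2) total) (PySem.Dict.empty : PySem.Dict Char Int)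
  total.items.foldl (fun acc kv => acc ++ List.replicate kv.2.toNat kv.1.toString) []

-- ===== PORT B =====
def minimumCharactersForWords_alt (words : List String) : List String :=
  let order := PySem.List.dedup (words.flatMap (fun w => w.toList))
  order.flatMap (fun c =>
    List.replicate
      ((PySem.List.max? (words.map (fun w => (w.toList.count c : Int))) (fun x => x)).getD 0).toNat
      c.toString)

-- ===== PRECONDITION & SPEC =====
def Spec_minimumCharactersForWords (words : List String) (out : List String) : Prop := out = minimumCharactersForWords_alt words
instance (words : List String) (out : List String) : Decidable (Spec_minimumCharactersForWords words out) := by unfold Spec_minimumCharactersForWords; infer_instance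

-- ===== CLAIM (what is proved, stated in full; the proofs are below) =====
def Claim_equal_minimumCharactersForWords : Prop := ∀ (words : List String), Dom_minimumCharactersForWords words → Spec_minimumCharactersForWords words (minimumCharactersForWords words)

-- ===== LEMMAS AND PROOFS =====

-- A's per-word counting loop builds exactly Counter(word)
lemma wordDict_eq_counter (l : List Char) :
    l.foldl (fun d c => if d.contains c then d.insert c (d.getD c 0 + 1) else d.insert c 1)
      (PySem.Dict.empty : PySem.Dict Char Int) = PySem.Dict.counter l := by
  rw [← PySem.Dict.foldl_insert_getD_add_one_eq_counter]
  apply PySem.List.foldl_congr_mem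
  intro d c _
  by_cases h : d.contains c
  · simp [h]
  · simp [h, PySem.Dict.getD_of_not_contains _ _ (by simpa using h)]

-- A's merge loop leaves an absent key's value alone
lemma getD_merge_not_mem (ps : List (Char × Int)) (t : PySem.Dict Char Int) (c : Char)
    (h : c ∉ ps.map Prod.fst) :
    (ps.foldl (fun t kv =>
      if t.contains kv.1 then
        if kv.2 > t.getD kv.1 0 then t.insert kv.1 kv.2 else t
      else t.insert kv.1 kv.2) t).getD c 0 = t.getD c 0 := by
  induction ps generalizing t with
  | nil => rfl
  | cons p rest ih =>
    simp only [List.map_cons, List.mem_cons, not_or] at h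
    rw [List.foldl_cons, ih _ h.2]
    by_cases hc : t.contains p.1
    · by_cases hv : p.2 > t.getD p.1 0
      · simp [hc, hv, PySem.Dict.getD_insert_of_ne _ _ _ h.1]
      · simp [hc, hv]
    · simp [hc, PySem.Dict.getD_insert_of_ne _ _ _ h.1]

-- A's merge loop max-updates a present key (distinct keys, positive values)
lemma getD_merge_mem (ps : List (Char × Int)) (t : PySem.Dict Char Int) (c : Char) (v : Int)
    (hmem : (c, v) ∈ ps) (hnd : (ps.map Prod.fst).Nodup) (hv : 1 ≤ v) :
    (ps.foldl (fun t kv =>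
      if t.contains kv.1 then
        if kv.2 > t.getD kv.1 0 then t.insert kv.1 kv.2 else t
      else t.insert kv.1 kv.2) t).getD c 0 = max (t.getD c 0) v := by
  induction ps generalizing t with
  | nil => cases hmem
  | cons p rest ih =>
    simp only [List.map_cons, List.nodup_cons] at hnd
    rcases List.mem_cons.mp hmem with hp | hp
    · -- head is (c, v); afterwards c is untouched
      subst hp
      have hrest : c ∉ rest.map Prod.fst := hnd.1
      rw [List.foldl_cons, getD_merge_not_mem _ _ _ hrest]
      by_cases hc : t.contains c
      · by_cases hgt : v > t.getD c 0
        · simp [hc, hgt, PySem.Dict.getD_insert_self, max_eq_right (le_of_lt hgt)]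
        · simp [hc, hgt, max_eq_left (not_lt.mp hgt)]
      · have h0 : t.getD c 0 = 0 := PySem.Dict.getD_of_not_contains _ _ (by simpa using hc)
        simp [hc, PySem.Dict.getD_insert_self, h0, max_eq_right (le_trans zero_le_one hv)]
    · -- head has a different key
      have hne : p.1 ≠ c := by
        intro he
        exact hnd.1 (he ▸ List.mem_map_of_mem hp)
      have hstep : ∀ t' : PySem.Dict Char Int,
          ((if t'.contains p.1 then
              if p.2 > t'.getD p.1 0 then t'.insert p.1 p.2 else t'
            else t'.insert p.1 p.2) : PySem.Dict Char Int).getD c 0 = t'.getD c 0 := by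
        intro t'
        by_cases hc : t'.contains p.1
        · by_cases hgt : p.2 > t'.getD p.1 0
          · simp [hc, hgt, PySem.Dict.getD_insert_of_ne _ _ _ (Ne.symm hne)]
          · simp [hc, hgt]
        · simp [hc, PySem.Dict.getD_insert_of_ne _ _ _ (Ne.symm hne)]
      rw [List.foldl_cons, ih _ hp hnd.2]
      rw [hstep t]

-- merging one word's Counter max-updates with that word's count
lemma getD_merge (t : PySem.Dict Char Int) (l : List Char) (c : Char) (h0 : 0 ≤ t.getD c 0) :
    ((PySem.Dict.counter l).items.foldl (fun t kv =>
      if t.contains kv.1 then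
        if kv.2 > t.getD kv.1 0 then t.insert kv.1 kv.2 else t
      else t.insert kv.1 kv.2) t).getD c 0 = max (t.getD c 0) (l.count c : Int) := by
  rw [PySem.Dict.items_counter]
  by_cases hc : c ∈ l
  · apply getD_merge_mem
    · exact List.mem_map_of_mem ((PySem.Set.mem_ofList _ _).mpr hc)
    · simp [List.map_map, Function.comp_def, List.map_id', PySem.Set.nodup_ofList]
    · exact_mod_cast List.count_pos_iff.mpr hc
  · rw [getD_merge_not_mem]
    · rw [List.count_eq_zero_of_not_mem hc]
      simp [max_eq_left h0]
    · simp only [List.map_map]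
      intro hmem
      rcases List.mem_map.mp hmem with ⟨k, hk, he⟩
      exact hc ((PySem.Set.mem_ofList _ _).mp ((by simpa using he : k = c) ▸ hk))

-- the whole total dict: value at c is the running max of per-word counts
lemma getD_total (words : List String) (c : Char) :
    ∀ t : PySem.Dict Char Int, 0 ≤ t.getD c 0 →
    ((words.foldl (fun total word =>
      (word.toList.foldl (fun d c =>
        if d.contains c then d.insert c (d.getD c 0 + 1) else d.insert c 1)
        (PySem.Dict.empty : PySem.Dict Char Int)).items.foldl (fun t kv =>
        if t.contains kv.1 then
          if kv.2 > t.getD kv.1 0 then t.insert kv.1 kv.2 else t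
        else t.insert kv.1 kv.2) total) t).getD c 0)
    = (words.map (fun w => (w.toList.count c : Int))).foldl max (t.getD c 0) := by
  induction words with
  | nil => intro t _; rfl
  | cons w ws ih =>
    intro t h0
    simp only [List.foldl_cons, List.map_cons]
    rw [ih _ (by rw [wordDict_eq_counter, getD_merge t _ c h0]; exact le_max_of_le_left h0)]
    rw [wordDict_eq_counter, getD_merge t _ c h0]

-- one merge step only ever Set.add's its key to the key list
lemma keys_merge (ps : List (Char × Int)) (t : PySem.Dict Char Int) :
    (ps.foldl (fun t kv =>
      if t.contains kv.1 then
        if kv.2 > t.getD kv.1 0 then t.insert kv.1 kv.2 else t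
      else t.insert kv.1 kv.2) t).keys = PySem.Set.update t.keys (ps.map Prod.fst) := by
  induction ps generalizing t with
  | nil => rfl
  | cons p rest ih =>
    rw [List.foldl_cons, ih, List.map_cons, PySem.Set.update_cons]
    congr 1
    by_cases hc : t.contains p.1
    · have hmem : p.1 ∈ t.keys := (PySem.Dict.contains_iff_mem_keys _ _).mp hc
      by_cases hv : p.2 > t.getD p.1 0
      · simp [hc, hv, PySem.Dict.keys_insert_of_contains _ _ hc, PySem.Set.add_of_mem hmem]
      · simp [hc, hv, PySem.Set.add_of_mem hmem]
    · have hmem : p.1 ∉ t.keys := fun h => hc ((PySem.Dict.contains_iff_mem_keys _ _).mpr h)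
      simp [hc, PySem.Dict.keys_insert_of_not_contains _ _ (by simpa using hc), PySem.Set.add_of_not_mem hmem]

-- the total dict's key list is the dedup of all characters in order
lemma keys_total (words : List String) :
    ∀ t : PySem.Dict Char Int,
    (words.foldl (fun total word =>
      (word.toList.foldl (fun d c =>
        if d.contains c then d.insert c (d.getD c 0 + 1) else d.insert c 1)
        (PySem.Dict.empty : PySem.Dict Char Int)).items.foldl (fun t kv =>
        if t.contains kv.1 then
          if kv.2 > t.getD kv.1 0 then t.insert kv.1 kv.2 else t
        else t.insert kv.1 kv.2) total) t).keys
    = PySem.Set.update t.keys (words.flatMap (fun w => w.toList)) := by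
  induction words with
  | nil => intro t; rfl
  | cons w ws ih =>
    intro t
    simp only [List.foldl_cons, List.flatMap_cons]
    rw [ih, wordDict_eq_counter, keys_merge]
    have hfst : ((PySem.Dict.counter w.toList).items.map Prod.fst) = PySem.Set.ofList w.toList := by
      rw [PySem.Dict.items_counter]
      simp [List.map_map, Function.comp_def, List.map_id']
    rw [hfst]
    rw [show PySem.Set.update t.keys (PySem.Set.ofList w.toList)
          = PySem.Set.update t.keys w.toList by
      rw [PySem.Set.update_eq_append_filter, PySem.Set.update_eq_append_filter,
        PySem.Set.ofList_ofList]]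
    rw [← PySem.Set.update_append]

-- flatMap only depends on values on members
lemma flatMap_congr_mem {α β : Type} (l : List α) (f g : α → List β)
    (h : ∀ x ∈ l, f x = g x) : l.flatMap f = l.flatMap g := by
  induction l with
  | nil => rfl
  | cons x xs ih =>
    simp only [List.flatMap_cons]
    rw [h x (List.mem_cons_self), ih (fun y hy => h y (List.mem_cons_of_mem _ hy))]

-- ===== VERDICT (by name: the statement is the Claim_ definition above) =====
theorem minimumCharactersForWords_spec : Claim_equal_minimumCharactersForWords := by
  intro words _
  unfold Spec_minimumCharactersForWords minimumCharactersForWords minimumCharactersForWords_alt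
  simp only []
  rw [PySem.List.foldl_append_eq_flatMap, List.nil_append]
  have hkeys := keys_total words PySem.Dict.empty
  rw [PySem.Dict.keys_empty] at hkeys
  have hnodup : (words.foldl (fun total word =>
      (word.toList.foldl (fun d c =>
        if d.contains c then d.insert c (d.getD c 0 + 1) else d.insert c 1)
        (PySem.Dict.empty : PySem.Dict Char Int)).items.foldl (fun t kv =>
        if t.contains kv.1 then
          if kv.2 > t.getD kv.1 0 then t.insert kv.1 kv.2 else t
        else t.insert kv.1 kv.2) total) (PySem.Dict.empty : PySem.Dict Char Int)).keys.Nodup := by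
    rw [hkeys, PySem.Set.update_nil_left]
    exact PySem.Set.nodup_ofList _
  rw [PySem.Dict.items_eq_map_keys _ hnodup 0, List.flatMap_map]
  rw [hkeys, PySem.Set.update_nil_left]
  apply flatMap_congr_mem
  intro c hc
  have hcmem : c ∈ words.flatMap (fun w => w.toList) := (PySem.Set.mem_ofList _ _).mp hc
  have hgetD := getD_total words c PySem.Dict.empty (by rw [PySem.Dict.getD_empty])
  rw [PySem.Dict.getD_empty] at hgetD
  simp only [hgetD]
  -- words is nonempty since c occurs in some word
  obtain ⟨w0, ws, hw⟩ : ∃ w0 ws, words = w0 :: ws := by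
    cases words with
    | nil => simp at hcmem
    | cons a l => exact ⟨a, l, rfl⟩
  subst hw
  simp only [List.map_cons, PySem.List.max?_id_cons, Option.getD_some, List.foldl_cons]
  rw [max_eq_right (Int.natCast_nonneg _)]
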